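-- pv_equiv track=rewrite | github.com/Phobosmir/checkio-home | max_box_count/brute_f.py | brute_force
-- ===== SOURCE A (Python) =====
-- import itertools
--
-- boxes = [(4, 51), (90, 49), (16, 80), (84, 64), (43, 14), (29, 2), (68, 91), (3, 57), (22, 53), (32, 84), (43, 59), (15, 84), (90, 19), (55, 73), (41, 41), (54, 31), (92, 77), (64, 81), (61, 20), (2, 31)]
--
-- def brute_force(boxes, max_w, max_v):
--     def _is_ok(boxes):
--         sum_w = sum([box[0] for box in boxes])
--         if sum_w > max_w:
--             return False
--         sum_v = sum([box[1] for box in boxes])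
--         if sum_v > max_v:
--             return False
--         return True
--
--     res = []
--     found_len = None
--
--     for element_count in range(len(boxes), 0, -1):
--         if found_len and element_count < found_len:
--             break
--
--         for m in itertools.combinations(boxes, element_count):
--             if _is_ok(m):
--                 found_len = len(m)
--                 res.append(list(m))
--
--     return res
--
-- res = []
-- ===== SOURCE B (Python) =====
-- def brute_force(boxes, max_w, max_v):
--     # Phase 1: one take/skip recursion computes the maximum cardinality of a
--     # subset within both limits (None if even the empty set exceeds a limit).
--     def best(xs, sw, sv):
--         if not xs:
--             return 0 if sw <= max_w and sv <= max_v else None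
--         w, v = xs[0]
--         skip = best(xs[1:], sw, sv)
--         take = best(xs[1:], sw + w, sv + v)
--         if take is not None:
--             take += 1
--         if skip is None:
--             return take
--         if take is None:
--             return skip
--         return max(skip, take)
--
--     k = best(boxes, 0, 0)
--     if not k:
--         return []
--
--     # Phase 2: generate only the size-k combinations (lexicographic by index,
--     # like itertools.combinations) and keep the feasible ones.
--     def combos(xs, r):
--         if r == 0:
--             return [[]]
--         if len(xs) < r:
--             return []
--         return [[xs[0]] + c for c in combos(xs[1:], r - 1)] + combos(xs[1:], r)
--
--     return [c for c in combos(boxes, k)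
--             if sum(w for w, _ in c) <= max_w and sum(v for _, v in c) <= max_v]
-- ===== Notes on version B (the rewrite author's own statement) =====
-- stated objective: alternative
-- what changed: B first computes the maximum feasible cardinality k with a take/skip recursion over the boxes, then generates only the size-k combinations with its own recursive generator and filters them, instead of A's descending scan over all sizes with itertools.combinations and found_len/break bookkeeping.
import Mathlib
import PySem

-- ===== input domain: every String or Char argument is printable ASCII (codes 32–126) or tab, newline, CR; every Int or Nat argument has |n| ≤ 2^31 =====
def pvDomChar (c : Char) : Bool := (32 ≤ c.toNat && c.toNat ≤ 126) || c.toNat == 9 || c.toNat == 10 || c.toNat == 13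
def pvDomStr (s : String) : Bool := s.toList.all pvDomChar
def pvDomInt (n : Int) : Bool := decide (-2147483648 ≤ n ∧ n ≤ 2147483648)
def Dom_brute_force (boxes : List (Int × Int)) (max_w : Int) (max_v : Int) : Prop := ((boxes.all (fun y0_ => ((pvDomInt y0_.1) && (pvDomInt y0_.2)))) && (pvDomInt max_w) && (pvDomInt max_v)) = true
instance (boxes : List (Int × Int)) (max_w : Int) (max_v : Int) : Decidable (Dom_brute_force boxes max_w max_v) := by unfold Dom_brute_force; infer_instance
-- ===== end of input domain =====

-- ===== PORT A =====
-- B restructures A: a take/skip recursion finds the max feasible cardinality k first,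
-- then only size-k combinations are generated and filtered (objective: alternative).

-- helpers for A: sums and the _is_ok check, transliterated
def bfSumW (c : List (Int × Int)) : Int := (c.map (fun box => box.1)).sum
def bfSumV (c : List (Int × Int)) : Int := (c.map (fun box => box.2)).sum
def bfIsOk (max_w max_v : Int) (c : List (Int × Int)) : Bool :=
  if bfSumW c > max_w then false
  else if bfSumV c > max_v then false
  else true

-- itertools.combinations(xs, r): size-r combinations in lexicographic index order
def itCombos : List (Int × Int) → Nat → List (List (Int × Int))
  | _, 0 => [[]]
  | [], _ + 1 => []
  | x :: rest, r + 1 => (itCombos rest r).map (fun c => x :: c) ++ itCombos rest (r + 1)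

-- the inner 'for m in itertools.combinations(...)' loop over state (res, found_len)
def bfInner (max_w max_v : Int) (combs : List (List (Int × Int)))
    (st : List (List (Int × Int)) × Option Int) : List (List (Int × Int)) × Option Int :=
  combs.foldl (fun st m =>
    if bfIsOk max_w max_v m then (st.1 ++ [m], some (m.length : Int)) else st) st

-- the outer 'for element_count in range(len(boxes), 0, -1)' loop with the break
def bfOuter (boxes : List (Int × Int)) (max_w max_v : Int) :
    List Int → List (List (Int × Int)) × Option Int → List (List (Int × Int))
  | [], st => st.1
  | c :: cs, st =>
    match st.2 with
    | some fl =>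
      -- 'if found_len and element_count < found_len: break' (found_len truthy = non-None and ≠ 0)
      if fl ≠ 0 ∧ c < fl then st.1
      else bfOuter boxes max_w max_v cs (bfInner max_w max_v (itCombos boxes c.toNat) st)
    | none => bfOuter boxes max_w max_v cs (bfInner max_w max_v (itCombos boxes c.toNat) st)

def brute_force (boxes : List (Int × Int)) (max_w : Int) (max_v : Int) : List (List (Int × Int)) :=
  bfOuter boxes max_w max_v (PySem.List.pyRange (boxes.length : Int) 0 (-1)) ([], none)

-- ===== PORT B =====
-- best(xs, sw, sv): max cardinality of a feasible subset of xs given running sums; none = no feasible subset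
def altBest (max_w max_v : Int) : List (Int × Int) → Int → Int → Option Int
  | [], sw, sv => if sw ≤ max_w ∧ sv ≤ max_v then some 0 else none
  | (w, v) :: rest, sw, sv =>
    let skip := altBest max_w max_v rest sw sv
    let take := match altBest max_w max_v rest (sw + w) (sv + v) with
                | some t => some (t + 1)
                | none => none
    match skip, take with
    | none, t => t
    | some s, none => some s
    | some s, some t => some (max s t)

-- combos(xs, r) from Source B: size-r combinations, lexicographic by index, with the len check
def altCombos : List (Int × Int) → Int → List (List (Int × Int))
  | xs, r =>
    if r = 0 then [[]]
    else if (xs.length : Int) < r then []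
    else
      match xs with
      | [] => []
      | x :: rest => (altCombos rest (r - 1)).map (fun c => x :: c) ++ altCombos rest r
termination_by xs _ => xs.length

def brute_force_alt (boxes : List (Int × Int)) (max_w : Int) (max_v : Int) : List (List (Int × Int)) :=
  match altBest max_w max_v boxes 0 0 with
  | none => []
  | some k =>
    if k = 0 then []
    else (altCombos boxes k).filter (fun c =>
      decide ((c.map (fun p => p.1)).sum ≤ max_w ∧ (c.map (fun p => p.2)).sum ≤ max_v))

-- ===== PRECONDITION & SPEC =====
def Spec_brute_force (boxes : List (Int × Int)) (max_w : Int) (max_v : Int) (out : List (List (Int × Int))) : Prop := out = brute_force_alt boxes max_w max_v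
instance (boxes : List (Int × Int)) (max_w : Int) (max_v : Int) (out : List (List (Int × Int))) : Decidable (Spec_brute_force boxes max_w max_v out) := by unfold Spec_brute_force; infer_instance

-- ===== CLAIM (what is proved, stated in full; the proofs are below) =====
def Claim_equal_brute_force : Prop := ∀ (boxes : List (Int × Int)) (max_w : Int) (max_v : Int), Dom_brute_force boxes max_w max_v → Spec_brute_force boxes max_w max_v (brute_force boxes max_w max_v)

-- ===== LEMMAS AND PROOFS =====

@[simp] lemma bfSumW_nil : bfSumW [] = 0 := rfl
@[simp] lemma bfSumW_cons (w v : Int) (t : List (Int × Int)) : bfSumW ((w, v) :: t) = w + bfSumW t := by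
  simp [bfSumW]
@[simp] lemma bfSumV_nil : bfSumV [] = 0 := rfl
@[simp] lemma bfSumV_cons (w v : Int) (t : List (Int × Int)) : bfSumV ((w, v) :: t) = v + bfSumV t := by
  simp [bfSumV]

-- the feasibility predicate, with running offsets
def Feas (max_w max_v sw sv : Int) (s : List (Int × Int)) : Prop :=
  sw + bfSumW s ≤ max_w ∧ sv + bfSumV s ≤ max_v

lemma bfIsOk_iff (max_w max_v : Int) (c : List (Int × Int)) :
    bfIsOk max_w max_v c = true ↔ Feas max_w max_v 0 0 c := by
  unfold bfIsOk Feas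
  split_ifs with h1 h2 <;> simp <;> omega

lemma bfIsOk_eq_decide (max_w max_v : Int) (c : List (Int × Int)) :
    bfIsOk max_w max_v c
      = decide ((c.map (fun p => p.1)).sum ≤ max_w ∧ (c.map (fun p => p.2)).sum ≤ max_v) := by
  unfold bfIsOk bfSumW bfSumV
  split_ifs with h1 h2 <;> simp <;> omega

lemma mem_itCombos : ∀ (xs : List (Int × Int)) (r : Nat) (s : List (Int × Int)),
    s ∈ itCombos xs r ↔ List.Sublist s xs ∧ s.length = r := by
  intro xs
  induction xs with
  | nil =>
    intro r s
    cases r with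
    | zero => simp [itCombos, List.sublist_nil]
    | succ r =>
      simp only [itCombos, List.not_mem_nil, false_iff, not_and, List.sublist_nil]
      rintro rfl; simp
  | cons x rest ih =>
    intro r s
    cases r with
    | zero =>
      simp only [itCombos, List.mem_singleton, List.length_eq_zero_iff]
      constructor
      · rintro rfl; exact ⟨List.nil_sublist _, rfl⟩
      · rintro ⟨_, rfl⟩; rfl
    | succ r =>
      simp only [itCombos, List.mem_append, List.mem_map, ih]
      constructor
      · rintro (⟨c, ⟨hc, hlc⟩, rfl⟩ | ⟨hs, hl⟩)
        · exact ⟨List.Sublist.cons₂ x hc, by simp [hlc]⟩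
        · exact ⟨hs.cons x, hl⟩
      · rintro ⟨hs, hl⟩
        rcases List.sublist_cons_iff.mp hs with h | ⟨t, rfl, ht⟩
        · exact Or.inr ⟨h, hl⟩
        · exact Or.inl ⟨t, ⟨ht, by simpa using hl⟩, rfl⟩

lemma itCombos_eq_nil {xs : List (Int × Int)} {r : Nat} (h : xs.length < r) : itCombos xs r = [] := by
  rcases hs : itCombos xs r with _ | ⟨s, _⟩
  · rfl
  · have hm : s ∈ itCombos xs r := by rw [hs]; simp
    rcases (mem_itCombos xs r s).mp hm with ⟨hsub, hlen⟩
    have := hsub.length_le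
    omega

lemma altCombos_eq (xs : List (Int × Int)) (r : Int) (hr : 0 ≤ r) :
    altCombos xs r = itCombos xs r.toNat := by
  induction xs generalizing r with
  | nil =>
    rw [altCombos]
    by_cases h0 : r = 0
    · simp [h0, itCombos]
    · have h1 : ((List.length ([] : List (Int × Int))) : Int) < r := by simp; omega
      rw [if_neg h0, if_pos h1]
      obtain ⟨t, ht⟩ : ∃ t, r.toNat = t + 1 := ⟨r.toNat - 1, by omega⟩
      rw [ht]; rfl
  | cons x rest ih =>
    rw [altCombos]
    by_cases h0 : r = 0
    · simp [h0, itCombos]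
    · by_cases h1 : (((x :: rest).length : Nat) : Int) < r
      · rw [if_neg h0, if_pos h1, itCombos_eq_nil (by omega : (x :: rest).length < r.toNat)]
      · rw [if_neg h0, if_neg h1]
        obtain ⟨t, ht⟩ : ∃ t, r.toNat = t + 1 := ⟨r.toNat - 1, by omega⟩
        rw [ih (r - 1) (by omega), ih r hr, ht,
            (by omega : (r - 1).toNat = t)]
        rfl

lemma Feas_cons (max_w max_v sw sv w v : Int) (t : List (Int × Int)) :
    Feas max_w max_v sw sv ((w, v) :: t) ↔ Feas max_w max_v (sw + w) (sv + v) t := by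
  unfold Feas
  simp only [bfSumW_cons, bfSumV_cons]
  omega

lemma altBest_none (max_w max_v : Int) : ∀ (xs : List (Int × Int)) (sw sv : Int),
    altBest max_w max_v xs sw sv = none →
    ∀ s, List.Sublist s xs → ¬ Feas max_w max_v sw sv s := by
  intro xs
  induction xs with
  | nil =>
    intro sw sv h s hs
    rw [List.sublist_nil.mp hs]
    rw [altBest] at h
    split_ifs at h with hf
    simpa [Feas] using hf
  | cons p rest ih =>
    obtain ⟨w, v⟩ := p
    intro sw sv h s hs
    cases hskip : altBest max_w max_v rest sw sv with
    | some a =>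
      cases htake : altBest max_w max_v rest (sw + w) (sv + v) with
      | none => simp [altBest, hskip, htake] at h
      | some t => simp [altBest, hskip, htake] at h
    | none =>
      cases htake : altBest max_w max_v rest (sw + w) (sv + v) with
      | some t => simp [altBest, hskip, htake] at h
      | none =>
        intro hf
        rcases List.sublist_cons_iff.mp hs with h' | ⟨t', rfl, ht'⟩
        · exact ih sw sv hskip s h' hf
        · exact ih (sw + w) (sv + v) htake t' ht' ((Feas_cons _ _ _ _ _ _ _).mp hf)

lemma altBest_some (max_w max_v : Int) : ∀ (xs : List (Int × Int)) (sw sv : Int) (k : Int),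
    altBest max_w max_v xs sw sv = some k →
    (∃ s, List.Sublist s xs ∧ Feas max_w max_v sw sv s ∧ (s.length : Int) = k) ∧
    (∀ s, List.Sublist s xs → Feas max_w max_v sw sv s → (s.length : Int) ≤ k) := by
  intro xs
  induction xs with
  | nil =>
    intro sw sv k h
    rw [altBest] at h
    split_ifs at h with hf
    · have hk : k = 0 := by simpa using h.symm
      subst hk
      exact ⟨⟨[], List.Sublist.refl _, by simpa [Feas] using hf, rfl⟩,
        fun s hs _ => by rw [List.sublist_nil.mp hs]; simp⟩
  | cons p rest ih =>
    obtain ⟨w, v⟩ := p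
    intro sw sv k h
    cases hskip : altBest max_w max_v rest sw sv with
    | none =>
      cases htake : altBest max_w max_v rest (sw + w) (sv + v) with
      | none => simp [altBest, hskip, htake] at h
      | some t =>
        have hk : k = t + 1 := by
          have := h; simp [altBest, hskip, htake] at this; omega
        subst hk
        obtain ⟨⟨s2, hs2, hf2, hl2⟩, hub2⟩ := ih (sw + w) (sv + v) t htake
        refine ⟨⟨(w, v) :: s2, List.Sublist.cons₂ _ hs2,
          (Feas_cons _ _ _ _ _ _ _).mpr hf2, by simp; omega⟩, ?_⟩
        intro s hs hf
        rcases List.sublist_cons_iff.mp hs with h' | ⟨t', rfl, ht'⟩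
        · exact absurd hf (altBest_none _ _ rest sw sv hskip s h')
        · have := hub2 t' ht' ((Feas_cons _ _ _ _ _ _ _).mp hf)
          simp; omega
    | some a =>
      obtain ⟨⟨s1, hs1, hf1, hl1⟩, hub1⟩ := ih sw sv a hskip
      cases htake : altBest max_w max_v rest (sw + w) (sv + v) with
      | none =>
        have hk : k = a := by
          have := h; simp [altBest, hskip, htake] at this; omega
        subst hk
        refine ⟨⟨s1, hs1.cons _, hf1, hl1⟩, ?_⟩
        intro s hs hf
        rcases List.sublist_cons_iff.mp hs with h' | ⟨t', rfl, ht'⟩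
        · exact hub1 s h' hf
        · exact absurd ((Feas_cons _ _ _ _ _ _ _).mp hf)
            (altBest_none _ _ rest (sw + w) (sv + v) htake t' ht')
      | some t =>
        obtain ⟨⟨s2, hs2, hf2, hl2⟩, hub2⟩ := ih (sw + w) (sv + v) t htake
        have hk : k = max a (t + 1) := by
          have := h; simp [altBest, hskip, htake] at this; omega
        subst hk
        constructor
        · by_cases hab : a ≤ t + 1
          · exact ⟨(w, v) :: s2, List.Sublist.cons₂ _ hs2,
              (Feas_cons _ _ _ _ _ _ _).mpr hf2, by simp; omega⟩
          · exact ⟨s1, hs1.cons _, hf1, by omega⟩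
        · intro s hs hf
          rcases List.sublist_cons_iff.mp hs with h' | ⟨t', rfl, ht'⟩
          · have := hub1 s h' hf; omega
          · have := hub2 t' ht' ((Feas_cons _ _ _ _ _ _ _).mp hf)
            simp; omega

lemma bfInner_nil (max_w max_v : Int) (L : List (List (Int × Int)))
    (h : ∀ m ∈ L, bfIsOk max_w max_v m = false) (st : List (List (Int × Int)) × Option Int) :
    bfInner max_w max_v L st = st := by
  induction L with
  | nil => rfl
  | cons m L ih =>
    have hm : bfIsOk max_w max_v m = false := h m (by simp)
    unfold bfInner at ih ⊢
    rw [List.foldl_cons]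
    simp only [hm, Bool.false_eq_true, if_false]
    exact ih (fun m' hm' => h m' (by simp [hm']))

lemma bfInner_char (max_w max_v k : Int) : ∀ (L : List (List (Int × Int)))
    (res : List (List (Int × Int))) (f0 : Option Int),
    (∃ m ∈ L, bfIsOk max_w max_v m = true) →
    (∀ m ∈ L, bfIsOk max_w max_v m = true → (m.length : Int) = k) →
    bfInner max_w max_v L (res, f0) = (res ++ L.filter (bfIsOk max_w max_v), some k) := by
  intro L
  induction L with
  | nil => rintro res f0 ⟨m, hm, _⟩ _; simp at hm
  | cons m L ih =>
    intro res f0 hex hall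
    have hstep : ∀ st, bfInner max_w max_v (m :: L) st
        = bfInner max_w max_v L (if bfIsOk max_w max_v m then (st.1 ++ [m], some (m.length : Int)) else st) := by
      intro st; rfl
    by_cases hm : bfIsOk max_w max_v m = true
    · have hk := hall m (by simp) hm
      rw [hstep, if_pos hm]
      by_cases hex2 : ∃ m' ∈ L, bfIsOk max_w max_v m' = true
      · rw [show ((res, f0).1 ++ [m], some ((m.length : Nat) : Int)) = (res ++ [m], some ((m.length : Nat) : Int)) from rfl,
            hk, ih (res ++ [m]) (some k) hex2 (fun m' h1 h2 => hall m' (by simp [h1]) h2)]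
        simp [hm]
      · have hLnil : L.filter (bfIsOk max_w max_v) = [] :=
          List.filter_eq_nil_iff.mpr (fun a ha => by
            intro hc; exact hex2 ⟨a, ha, by simpa using hc⟩)
        rw [show ((res, f0).1 ++ [m], some ((m.length : Nat) : Int)) = (res ++ [m], some ((m.length : Nat) : Int)) from rfl, hk,
            bfInner_nil max_w max_v L (List.filter_eq_nil_iff.mp hLnil |> fun H m' hm' => by simpa using H m' hm') _]
        simp [hm, hLnil]
    · have hm' : bfIsOk max_w max_v m = false := by simpa using hm
      rw [hstep, if_neg (by simp [hm'])]
      have hex' : ∃ m' ∈ L, bfIsOk max_w max_v m' = true := by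
        rcases hex with ⟨m1, hm1, ho⟩
        rcases List.mem_cons.mp hm1 with rfl | hm1'
        · exact absurd ho (by simp [hm'])
        · exact ⟨m1, hm1', ho⟩
      rw [show ((res, f0)) = (res, f0) from rfl,
          ih res f0 hex' (fun m1 h1 h2 => hall m1 (by simp [h1]) h2)]
      simp [hm']

lemma bfOuter_nil (boxes : List (Int × Int)) (max_w max_v : Int) :
    ∀ (counts : List Int) (res : List (List (Int × Int))),
    (∀ c ∈ counts, (itCombos boxes c.toNat).filter (bfIsOk max_w max_v) = []) →
    bfOuter boxes max_w max_v counts (res, none) = res := by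
  intro counts
  induction counts with
  | nil => intro res _; rfl
  | cons c cs ih =>
    intro res h
    have hfalse : ∀ m ∈ itCombos boxes c.toNat, bfIsOk max_w max_v m = false := by
      intro m hm
      have := List.filter_eq_nil_iff.mp (h c (by simp)) m hm
      simpa using this
    rw [show bfOuter boxes max_w max_v (c :: cs) (res, none)
        = bfOuter boxes max_w max_v cs (bfInner max_w max_v (itCombos boxes c.toNat) (res, none)) from rfl,
      bfInner_nil max_w max_v _ hfalse _]
    exact ih res (fun c' hc' => h c' (by simp [hc']))

lemma bfOuter_main (boxes : List (Int × Int)) (max_w max_v k : Int)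
    (hk1 : 1 ≤ k)
    (hempty : ∀ c : Int, k < c → (itCombos boxes c.toNat).filter (bfIsOk max_w max_v) = [])
    (hne : (itCombos boxes k.toNat).filter (bfIsOk max_w max_v) ≠ [])
    (hlen : ∀ m ∈ itCombos boxes k.toNat, bfIsOk max_w max_v m = true → (m.length : Int) = k) :
    ∀ (n : Int), k ≤ n →
    bfOuter boxes max_w max_v (PySem.List.pyRange n 0 (-1)) ([], none)
      = (itCombos boxes k.toNat).filter (bfIsOk max_w max_v) := by
  have main : ∀ (d : Nat) (n : Int), k ≤ n → (n - k).toNat = d →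
      bfOuter boxes max_w max_v (PySem.List.pyRange n 0 (-1)) ([], none)
        = (itCombos boxes k.toNat).filter (bfIsOk max_w max_v) := by
    intro d
    induction d with
    | zero =>
      intro n hkn hd
      have hnk : n = k := by omega
      subst hnk
      rw [PySem.List.pyRange_neg_one_cons (by omega : (0 : Int) < n)]
      have hex : ∃ m ∈ itCombos boxes n.toNat, bfIsOk max_w max_v m = true := by
        by_contra hno
        push Not at hno
        exact hne (List.filter_eq_nil_iff.mpr (fun a ha => by simpa using hno a ha))
      rw [show bfOuter boxes max_w max_v (n :: PySem.List.pyRange (n - 1) 0 (-1)) ([], none)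
            = bfOuter boxes max_w max_v (PySem.List.pyRange (n - 1) 0 (-1))
                (bfInner max_w max_v (itCombos boxes n.toNat) ([], none)) from rfl,
          bfInner_char max_w max_v n _ [] none hex hlen]
      by_cases hk2 : 2 ≤ n
      · rw [PySem.List.pyRange_neg_one_cons (by omega : (0 : Int) < n - 1)]
        rw [show bfOuter boxes max_w max_v
              ((n - 1) :: PySem.List.pyRange (n - 1 - 1) 0 (-1))
              ([] ++ (itCombos boxes n.toNat).filter (bfIsOk max_w max_v), some n)
            = if n ≠ 0 ∧ n - 1 < n
              then [] ++ (itCombos boxes n.toNat).filter (bfIsOk max_w max_v)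
              else bfOuter boxes max_w max_v (PySem.List.pyRange (n - 1 - 1) 0 (-1))
                (bfInner max_w max_v (itCombos boxes (n - 1).toNat)
                  ([] ++ (itCombos boxes n.toNat).filter (bfIsOk max_w max_v), some n)) from rfl,
          if_pos ⟨by omega, by omega⟩]
        simp
      · have h1 : n = 1 := by omega
        subst h1
        rw [show ((1 : Int) - 1) = 0 from rfl, PySem.List.pyRange_neg_one_eq_nil (le_refl 0)]
        simp [bfOuter]
    | succ d ihd =>
      intro n hkn hd
      have hlt : k < n := by omega
      rw [PySem.List.pyRange_neg_one_cons (by omega : (0 : Int) < n)]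
      have hfalse : ∀ m ∈ itCombos boxes n.toNat, bfIsOk max_w max_v m = false := by
        intro m hm
        have := List.filter_eq_nil_iff.mp (hempty n hlt) m hm
        simpa using this
      rw [show bfOuter boxes max_w max_v (n :: PySem.List.pyRange (n - 1) 0 (-1)) ([], none)
            = bfOuter boxes max_w max_v (PySem.List.pyRange (n - 1) 0 (-1))
                (bfInner max_w max_v (itCombos boxes n.toNat) ([], none)) from rfl,
          bfInner_nil max_w max_v _ hfalse _]
      exact ihd (n - 1) (by omega) (by omega)
  intro n hkn
  exact main (n - k).toNat n hkn rfl

-- ===== VERDICT (by name: the statement is the Claim_ definition above) =====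
theorem brute_force_spec : Claim_equal_brute_force := by
  intro boxes max_w max_v _
  unfold Spec_brute_force brute_force brute_force_alt
  cases hb : altBest max_w max_v boxes 0 0 with
  | none =>
    apply bfOuter_nil
    intro c _
    apply List.filter_eq_nil_iff.mpr
    intro m hm hok
    rcases (mem_itCombos boxes c.toNat m).mp hm with ⟨hsub, _⟩
    exact altBest_none _ _ boxes 0 0 hb m hsub ((bfIsOk_iff _ _ _).mp hok)
  | some k =>
    obtain ⟨⟨s0, hs0, hf0, hl0⟩, hub⟩ := altBest_some _ _ boxes 0 0 k hb
    show bfOuter boxes max_w max_v (PySem.List.pyRange (boxes.length : Int) 0 (-1)) ([], none)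
      = if k = 0 then [] else
          (altCombos boxes k).filter (fun c =>
            decide ((c.map (fun p => p.1)).sum ≤ max_w ∧ (c.map (fun p => p.2)).sum ≤ max_v))
    by_cases hk0 : k = 0
    · subst hk0
      rw [if_pos rfl]
      apply bfOuter_nil
      intro c hc
      have hc1 : 0 < c := (PySem.List.mem_pyRange_neg_one.mp hc).1
      apply List.filter_eq_nil_iff.mpr
      intro m hm hok
      rcases (mem_itCombos boxes c.toNat m).mp hm with ⟨hsub, hlen⟩
      have hle := hub m hsub ((bfIsOk_iff _ _ _).mp hok)
      omega
    · rw [if_neg hk0]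
      have hk1 : (1 : Int) ≤ k := by
        have : (0 : Int) ≤ (s0.length : Int) := Int.natCast_nonneg _
        omega
      have hkn : k ≤ (boxes.length : Int) := by
        have hle : s0.length ≤ boxes.length := hs0.length_le
        have : (s0.length : Int) ≤ (boxes.length : Int) := by exact_mod_cast hle
        omega
      have hlen : ∀ m ∈ itCombos boxes k.toNat, bfIsOk max_w max_v m = true → (m.length : Int) = k := by
        intro m hm _
        rcases (mem_itCombos boxes k.toNat m).mp hm with ⟨_, hl⟩
        omega
      have hempty : ∀ c : Int, k < c →
          (itCombos boxes c.toNat).filter (bfIsOk max_w max_v) = [] := by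
        intro c hc
        apply List.filter_eq_nil_iff.mpr
        intro m hm hok
        rcases (mem_itCombos boxes c.toNat m).mp hm with ⟨hsub, hl⟩
        have hle := hub m hsub ((bfIsOk_iff _ _ _).mp hok)
        omega
      have hne : (itCombos boxes k.toNat).filter (bfIsOk max_w max_v) ≠ [] := by
        have hmem : s0 ∈ itCombos boxes k.toNat :=
          (mem_itCombos boxes k.toNat s0).mpr ⟨hs0, by omega⟩
        exact List.ne_nil_of_mem
          (List.mem_filter.mpr ⟨hmem, (bfIsOk_iff _ _ _).mpr hf0⟩)
      rw [bfOuter_main boxes max_w max_v k hk1 hempty hne hlen (boxes.length : Int) hkn,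
          altCombos_eq boxes k (by omega)]
      exact (List.filter_congr (fun c _ => (bfIsOk_eq_decide max_w max_v c).symm)).symm
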